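-- pv_equiv track=rewrite | github.com/Nagasai561/Advent-of-Code | 2023/Day-12_(1).py | is_matching
-- ===== SOURCE A (Python) =====
-- def is_matching(pattern, contiguous_sizes): # given a pattern (without '?') and an array of contiguous sizes, checking if it aligns
--     sizes_ind = 0
--     n = len(contiguous_sizes)
--     length = 0  # stores the current length of consecutive '#'
--     for char in pattern:
--         if(char == '#'):
--             length += 1
--         else:
--             if(length != 0):
--                 if(sizes_ind >= n): # if there are more '#', return false
--                     return False
--                 if(length != contiguous_sizes[sizes_ind]):  # if it doesn't align with the array, return false
--                     return False
--                 sizes_ind += 1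
--             length = 0
--
--     if(length != 0):
--         if(sizes_ind >= n):
--             return False
--         if(length != contiguous_sizes[sizes_ind]):
--             return False
--         sizes_ind += 1
--
--     return sizes_ind == n   # atlast, check if we covered all contiguous blocks
-- ===== SOURCE B (Python) =====
-- def is_matching(pattern, contiguous_sizes):
--     # build the list of contiguous '#'-block lengths, then compare it as a whole
--     blocks = []
--     run = 0
--     for c in pattern:
--         if c == '#':
--             run += 1
--         else:
--             if run:
--                 blocks.append(run)
--             run = 0
--     if run:
--         blocks.append(run)
--     return blocks == list(contiguous_sizes)
-- ===== Notes on version B (the rewrite author's own statement) =====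
-- stated objective: simpler
-- what changed: Replaces the streaming index-based comparison with early exits by a two-phase build-then-compare: collect all '#'-block lengths first, then compare the whole list for equality.
import Mathlib
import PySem

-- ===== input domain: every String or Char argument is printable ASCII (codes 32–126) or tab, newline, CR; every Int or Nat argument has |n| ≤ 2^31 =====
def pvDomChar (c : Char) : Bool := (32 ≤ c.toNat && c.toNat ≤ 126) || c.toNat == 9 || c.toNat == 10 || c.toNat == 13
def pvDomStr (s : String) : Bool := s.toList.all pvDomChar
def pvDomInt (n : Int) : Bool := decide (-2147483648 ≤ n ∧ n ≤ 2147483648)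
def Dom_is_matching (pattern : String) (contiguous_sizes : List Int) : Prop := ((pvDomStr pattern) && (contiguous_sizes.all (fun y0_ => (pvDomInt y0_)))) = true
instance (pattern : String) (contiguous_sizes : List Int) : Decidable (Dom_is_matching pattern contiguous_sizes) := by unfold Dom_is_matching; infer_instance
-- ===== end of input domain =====

-- B replaces A's streaming index-based comparison (early exits) by building the
-- whole list of '#'-block lengths first and comparing it to the sizes list.

-- ===== PORT A =====
-- the for-loop over pattern with state (sizes_ind, length) and early returns
def pvGoA (sizes : List Int) : List Char → Nat → Nat → Bool
  | [], ind, length =>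
      -- post-loop trailing-block check, then 'sizes_ind == n'
      if length ≠ 0 then
        if sizes.length ≤ ind then false
        else if (length : Int) ≠ PySem.List.pyGetD sizes (ind : Int) 0 then false
        else (ind + 1 == sizes.length)
      else (ind == sizes.length)
  | c :: cs, ind, length =>
      if c = '#' then pvGoA sizes cs ind (length + 1)
      else
        if length ≠ 0 then
          if sizes.length ≤ ind then false
          else if (length : Int) ≠ PySem.List.pyGetD sizes (ind : Int) 0 then false
          else pvGoA sizes cs (ind + 1) 0
        else pvGoA sizes cs ind 0

def is_matching (pattern : String) (contiguous_sizes : List Int) : Bool :=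
  pvGoA contiguous_sizes pattern.toList 0 0

-- ===== PORT B =====
-- the block-collecting loop: run lengths of maximal '#' runs, in order
def pvBlocks : List Char → Nat → List Int
  | [], run => if run ≠ 0 then [(run : Int)] else []
  | c :: cs, run =>
      if c = '#' then pvBlocks cs (run + 1)
      else if run ≠ 0 then (run : Int) :: pvBlocks cs 0
      else pvBlocks cs 0

def is_matching_alt (pattern : String) (contiguous_sizes : List Int) : Bool :=
  decide (pvBlocks pattern.toList 0 = contiguous_sizes)

-- ===== PRECONDITION & SPEC =====
def Spec_is_matching (pattern : String) (contiguous_sizes : List Int) (out : Bool) : Prop := out = is_matching_alt pattern contiguous_sizes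
instance (pattern : String) (contiguous_sizes : List Int) (out : Bool) : Decidable (Spec_is_matching pattern contiguous_sizes out) := by unfold Spec_is_matching; infer_instance

-- ===== CLAIM (what is proved, stated in full; the proofs are below) =====
def Claim_equal_is_matching : Prop := ∀ (pattern : String) (contiguous_sizes : List Int), Dom_is_matching pattern contiguous_sizes → Spec_is_matching pattern contiguous_sizes (is_matching pattern contiguous_sizes)

-- ===== LEMMAS AND PROOFS =====

-- streaming invariant: A's loop from state (ind, run) decides whether the blocks
-- still to be produced (with pending run 'run') equal the remaining sizes
theorem pvGoA_eq_blocks (sizes : List Int) :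
    ∀ (cs : List Char) (run ind : Nat), ind ≤ sizes.length →
      pvGoA sizes cs ind run = decide (pvBlocks cs run = sizes.drop ind) := by
  intro cs
  induction cs with
  | nil =>
    intro run ind hind
    simp only [pvGoA, pvBlocks]
    by_cases hr : run = 0
    · simp only [hr, ne_eq, not_true_eq_false, if_false, Bool.beq_eq_decide_eq,
        decide_eq_decide]
      constructor
      · intro h; symm; rw [List.drop_eq_nil_iff]; omega
      · intro h; have := List.drop_eq_nil_iff.mp h.symm; omega
    · by_cases hle : sizes.length ≤ ind
      · have hnil : sizes.drop ind = [] := List.drop_eq_nil_of_le hle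
        simp [hr, hle, hnil]
      · have hlt : ind < sizes.length := Nat.lt_of_not_le hle
        have hget : PySem.List.pyGetD sizes (ind : Int) 0 = sizes[ind] := by
          simp [PySem.List.pyGetD_natCast, List.getD_eq_getElem?_getD, hlt]
        have hdrop : sizes.drop ind = sizes[ind] :: sizes.drop (ind + 1) :=
          List.drop_eq_getElem_cons hlt
        by_cases hne : (run : Int) = sizes[ind]
        · simp only [hr, ne_eq, not_false_eq_true, if_true, hle, if_false, hget, hne,
            not_true_eq_false, hdrop, Bool.beq_eq_decide_eq, decide_eq_decide,
            List.cons.injEq, true_and]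
          constructor
          · intro h; symm; rw [List.drop_eq_nil_iff]; omega
          · intro h; have := List.drop_eq_nil_iff.mp h.symm; omega
        · simp only [hr, ne_eq, not_false_eq_true, if_true, hle, if_false, hget, hne,
            hdrop, List.cons.injEq, false_and, decide_false]
  | cons c cs ih =>
    intro run ind hind
    simp only [pvGoA, pvBlocks]
    by_cases hc : c = '#'
    · simp only [hc, if_true]
      exact ih (run + 1) ind hind
    · by_cases hr : run = 0
      · simp only [hc, if_false, hr, ne_eq, not_true_eq_false]
        exact ih 0 ind hind
      · by_cases hle : sizes.length ≤ ind
        · have hnil : sizes.drop ind = [] := List.drop_eq_nil_of_le hle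
          simp [hc, hr, hle, hnil]
        · have hlt : ind < sizes.length := Nat.lt_of_not_le hle
          have hget : PySem.List.pyGetD sizes (ind : Int) 0 = sizes[ind] := by
            simp [PySem.List.pyGetD_natCast, List.getD_eq_getElem?_getD, hlt]
          have hdrop : sizes.drop ind = sizes[ind] :: sizes.drop (ind + 1) :=
            List.drop_eq_getElem_cons hlt
          by_cases hne : (run : Int) = sizes[ind]
          · simp only [hc, if_false, hr, ne_eq, not_false_eq_true, if_true, hle, hget, hne,
              not_true_eq_false, hdrop, ih 0 (ind + 1) hlt,
              List.cons.injEq, true_and]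
          · simp only [hc, if_false, hr, ne_eq, not_false_eq_true, if_true, hle, hget, hne,
              hdrop, List.cons.injEq, false_and, decide_false]

-- ===== VERDICT (by name: the statement is the Claim_ definition above) =====
theorem is_matching_spec : Claim_equal_is_matching := by
  intro pattern sizes _
  unfold Spec_is_matching is_matching is_matching_alt
  simpa using pvGoA_eq_blocks sizes pattern.toList 0 0 (Nat.zero_le _)
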